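-- pv_equiv track=rewrite | github.com/yeeSilver/Algorithm_Python | 구현/실버/019.py | groupNum
-- ===== SOURCE A (Python) =====
-- def groupNum(arr):
--     result = []
--     if(len(arr) == 1 or len(arr) == 2):
--         r = True
--     else:
--         result.append(arr[0])
--         result.append(arr[1])
--         for i in range(2, len(arr)):
--             if arr[i] in result:
--                 if arr[i-1] == arr[i]:
--                     result.append(arr[i])
--                 else:
--                     pass
--             else:
--                 result.append(arr[i])
--
--         if len(arr) == len(result):
--             r = True
--         else:
--             r = False
--     return r
-- ===== SOURCE B (Python) =====
-- def groupNum(arr):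
--     # Collapse consecutive runs to their keys, then check the keys are globally unique.
--     keys = [arr[0]]
--     prev = arr[0]
--     for x in arr[1:]:
--         if x != prev:
--             keys.append(x)
--             prev = x
--     return len(keys) == len(set(keys))
-- ===== Notes on version B (the rewrite author's own statement) =====
-- stated objective: faster
-- what changed: Replaces A's special-cased length-1/2 branches and per-element membership test against the growing result list (with an append/pass case split) by a single run-collapse pass followed by one global uniqueness check via set().
import Mathlib
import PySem

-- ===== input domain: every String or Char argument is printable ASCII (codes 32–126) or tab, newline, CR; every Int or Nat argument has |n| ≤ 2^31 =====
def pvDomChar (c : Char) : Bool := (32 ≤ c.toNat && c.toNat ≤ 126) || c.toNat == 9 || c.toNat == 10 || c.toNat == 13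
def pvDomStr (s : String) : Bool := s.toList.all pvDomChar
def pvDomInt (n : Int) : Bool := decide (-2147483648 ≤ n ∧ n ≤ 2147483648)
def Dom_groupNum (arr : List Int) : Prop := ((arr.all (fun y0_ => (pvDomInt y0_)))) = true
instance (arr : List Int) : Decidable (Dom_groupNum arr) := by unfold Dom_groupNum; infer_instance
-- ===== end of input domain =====

-- B collapses consecutive runs to their keys and checks global uniqueness of the keys,
-- instead of A's per-element membership test against the growing result list.
-- Both A and B raise IndexError on the empty list (indexing its first element); Pre_ excludes it.

-- ===== PORT A =====
def groupNum (arr : List Int) : Bool :=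
  if arr.length = 1 ∨ arr.length = 2 then true
  else
    match arr with
    | a0 :: a1 :: _ =>
      let result : List Int := [a0, a1]
      let result := (PySem.List.pyRange 2 (arr.length : Int) 1).foldl
        (fun res i =>
          if res.contains (PySem.List.pyGetD arr i 0) then
            if PySem.List.pyGetD arr (i - 1) 0 = PySem.List.pyGetD arr i 0 then
              res ++ [PySem.List.pyGetD arr i 0]
            else res
          else res ++ [PySem.List.pyGetD arr i 0]) result
      decide (arr.length = result.length)
    | _ => false   -- unreachable under Pre_: Python raises IndexError indexing the first element

-- ===== PORT B =====
def groupNum_alt (arr : List Int) : Bool :=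
  match arr with
  | [] => false    -- unreachable under Pre_: Python raises IndexError indexing the first element
  | a0 :: rest =>
    let st := rest.foldl
      (fun (st : List Int × Int) x => if x ≠ st.2 then (st.1 ++ [x], x) else st)
      ([a0], a0)
    decide (st.1.length = (PySem.Set.ofList st.1).length)

-- ===== PRECONDITION & SPEC =====
-- Pre_ excludes exactly the empty list, on which A (and B) raise IndexError indexing the first element.
def Pre_groupNum (arr : List Int) : Prop := arr ≠ []
instance (arr : List Int) : Decidable (Pre_groupNum arr) := by unfold Pre_groupNum; infer_instance
def pvWitness_groupNum : List Int := ([1, 2, 2, 3])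
def Spec_groupNum (arr : List Int) (out : Bool) : Prop := out = groupNum_alt arr
instance (arr : List Int) (out : Bool) : Decidable (Spec_groupNum arr out) := by unfold Spec_groupNum; infer_instance

-- ===== CLAIM (what is proved, stated in full; the proofs are below) =====
def Claim_equal_groupNum : Prop := ∀ (arr : List Int), Dom_groupNum arr → Pre_groupNum arr → Spec_groupNum arr (groupNum arr)

-- ===== LEMMAS AND PROOFS =====

-- the keys of the maximal runs of consecutive equal values, starting from key a
def runKeys : Int → List Int → List Int
  | a, [] => [a]
  | a, x :: xs => if x = a then runKeys a xs else a :: runKeys x xs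

-- A's loop, written as structural recursion over the tail (prev = arr[i-1])
def aLoop : Int → List Int → List Int → List Int
  | _, [], res => res
  | prev, x :: xs, res =>
      aLoop x xs
        (if res.contains x then (if prev = x then res ++ [x] else res) else res ++ [x])

-- the condition "every step of A's loop appends"
def aOk : Int → List Int → List Int → Bool
  | _, [], _ => true
  | prev, x :: xs, seen => (x == prev || !seen.contains x) && aOk x xs (x :: seen)

lemma runKeys_cons (xs : List Int) (a : Int) : runKeys a xs = a :: (runKeys a xs).tail := by
  induction xs generalizing a with
  | nil => simp [runKeys]
  | cons x xs ih =>
    by_cases h : x = a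
    · simp [runKeys, h]; exact ih a
    · simp [runKeys, h]

lemma aLoop_le (xs : List Int) : ∀ (prev : Int) (res : List Int),
    (aLoop prev xs res).length ≤ res.length + xs.length := by
  induction xs with
  | nil => intro prev res; simp [aLoop]
  | cons x xs ih =>
    intro prev res
    simp only [aLoop]
    split_ifs with h1 h2 <;>
      · refine le_trans (ih _ _) ?_
        simp only [List.length_append, List.length_cons, List.length_nil]
        omega

lemma aLoop_len_iff (xs : List Int) : ∀ (prev : Int) (res seen : List Int),
    (∀ v : Int, v ∈ res ↔ v ∈ seen) →
    ((aLoop prev xs res).length = res.length + xs.length ↔ aOk prev xs seen = true) := by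
  induction xs with
  | nil => intro prev res seen _; simp [aLoop, aOk]
  | cons x xs ih =>
    intro prev res seen hmem
    by_cases hc : x ∈ res
    · by_cases hp : prev = x
      · have : aLoop prev (x :: xs) res = aLoop x xs (res ++ [x]) := by
          simp [aLoop, hc, hp]
        rw [this]
        have hok : aOk prev (x :: xs) seen = aOk x xs (x :: seen) := by
          simp [aOk, hp.symm]
        rw [hok]
        have := ih x (res ++ [x]) (x :: seen) (by
          intro v; simp [hmem v]; tauto)
        simp only [List.length_append, List.length_cons] at this ⊢
        rw [show res.length + (xs.length + 1) = res.length + 1 + xs.length by omega]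
        exact this
      · have hstep : aLoop prev (x :: xs) res = aLoop x xs res := by
          simp [aLoop, hc, hp]
        have hok : aOk prev (x :: xs) seen = false := by
          have hx : x ∈ seen := (hmem x).mp hc
          simp [aOk, hx]
          intro h; exact absurd h.symm hp
        rw [hstep, hok]
        have hle := aLoop_le xs x res
        simp only [List.length_cons]
        constructor
        · intro h; omega
        · intro h; exact absurd h (by simp)
    · have hstep : aLoop prev (x :: xs) res = aLoop x xs (res ++ [x]) := by
        simp [aLoop, hc]
      have hok : aOk prev (x :: xs) seen = aOk x xs (x :: seen) := by
        have hx : x ∉ seen := fun h => hc ((hmem x).mpr h)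
        simp [aOk, hx]
      rw [hstep, hok]
      have := ih x (res ++ [x]) (x :: seen) (by intro v; simp [hmem v]; tauto)
      simp only [List.length_append, List.length_cons] at this ⊢
      rw [show res.length + (xs.length + 1) = res.length + 1 + xs.length by omega]
      exact this

lemma ok_iff (xs : List Int) : ∀ (prev : Int) (seen : List Int), prev ∈ seen →
    (aOk prev xs seen = true ↔
      ((runKeys prev xs).tail.Nodup ∧ ∀ k ∈ (runKeys prev xs).tail, k ∉ seen)) := by
  induction xs with
  | nil => intro prev seen _; simp [aOk, runKeys]
  | cons x xs ih =>
    intro prev seen hprev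
    by_cases hx : x = prev
    · subst hx
      have hok : aOk x (x :: xs) seen = aOk x xs (x :: seen) := by simp [aOk]
      have hrk : runKeys x (x :: xs) = runKeys x xs := by simp [runKeys]
      rw [hok, hrk, ih x (x :: seen) (by simp)]
      constructor
      · rintro ⟨h1, h2⟩
        exact ⟨h1, fun k hk => fun hkseen => h2 k hk (by simp [hkseen])⟩
      · rintro ⟨h1, h2⟩
        refine ⟨h1, fun k hk => ?_⟩
        simp only [List.mem_cons, not_or]
        exact ⟨fun he => h2 k hk (he ▸ hprev), h2 k hk⟩
    · have hbe : (x == prev) = false := by simp [hx]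
      have hok : aOk prev (x :: xs) seen = (!seen.contains x && aOk x xs (x :: seen)) := by
        simp [aOk, hbe]
      have hrk : runKeys prev (x :: xs) = prev :: runKeys x xs := by
        simp only [runKeys]; rw [if_neg hx]
      obtain ⟨t, hsplit⟩ : ∃ t, runKeys x xs = x :: t := ⟨_, runKeys_cons xs x⟩
      have hih := ih x (x :: seen) (by simp)
      rw [hsplit, List.tail_cons] at hih
      rw [hok, hrk, hsplit, List.tail_cons, Bool.and_eq_true, hih]
      have hxc : ((!seen.contains x) = true) ↔ x ∉ seen := by
        simp
      rw [hxc, List.nodup_cons]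
      constructor
      · rintro ⟨hxseen, hnd, hall⟩
        refine ⟨⟨fun hxt => (hall x hxt) (by simp), hnd⟩, fun k hk => ?_⟩
        rcases List.mem_cons.mp hk with rfl | hk'
        · exact hxseen
        · exact fun hks => (hall k hk') (by simp [hks])
      · rintro ⟨⟨hxt, hnd⟩, hall⟩
        refine ⟨hall x (by simp), hnd, fun k hk => ?_⟩
        simp only [List.mem_cons, not_or]
        exact ⟨fun he => hxt (he ▸ hk), hall k (by simp [hk])⟩

lemma final_iff (rest : List Int) (a0 a1 : Int) :
    (aOk a1 rest [a0, a1] = true) ↔ (runKeys a0 (a1 :: rest)).Nodup := by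
  rw [ok_iff rest a1 [a0, a1] (by simp)]
  obtain ⟨t, hsplit⟩ : ∃ t, runKeys a1 rest = a1 :: t := ⟨_, runKeys_cons rest a1⟩
  by_cases h : a1 = a0
  · have h2 : runKeys a0 (a1 :: rest) = runKeys a1 rest := by rw [h]; simp [runKeys]
    rw [h2, hsplit, List.tail_cons, List.nodup_cons]
    constructor
    · rintro ⟨h1', h2'⟩
      exact ⟨fun hm => (h2' a1 hm) (by simp), h1'⟩
    · rintro ⟨h1', h2'⟩
      refine ⟨h2', fun k hk hmem => ?_⟩
      rcases (by simpa using hmem : k = a0 ∨ k = a1) with he | he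
      · exact h1' ((he.trans h.symm) ▸ hk)
      · exact h1' (he ▸ hk)
  · have h2 : runKeys a0 (a1 :: rest) = a0 :: runKeys a1 rest := by
      simp only [runKeys]; rw [if_neg h]
    rw [h2, hsplit, List.tail_cons, List.nodup_cons, List.nodup_cons]
    constructor
    · rintro ⟨h1', h2'⟩
      have ha0 : a0 ∉ t := fun hm => (h2' a0 hm) (by simp)
      have ha1 : a1 ∉ t := fun hm => (h2' a1 hm) (by simp)
      refine ⟨?_, ha1, h1'⟩
      simp only [List.mem_cons, not_or]
      exact ⟨fun he => h he.symm, ha0⟩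
    · rintro ⟨hh0, hh1, h1'⟩
      have h0' : a0 ∉ t := fun hm => hh0 (List.mem_cons_of_mem _ hm)
      refine ⟨h1', fun k hk hmem => ?_⟩
      rcases (by simpa using hmem : k = a0 ∨ k = a1) with he | he
      · exact h0' (he ▸ hk)
      · exact hh1 (he ▸ hk)

lemma set_len_le (xs : List Int) : ∀ (acc : List Int),
    (xs.foldl PySem.Set.add acc).length ≤ acc.length + xs.length := by
  induction xs with
  | nil => intro acc; simp
  | cons y ys ih =>
    intro acc
    simp only [List.foldl_cons]
    refine le_trans (ih (PySem.Set.add acc y)) ?_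
    have : (PySem.Set.add acc y).length ≤ acc.length + 1 := by
      simp only [PySem.Set.add]
      split
      · omega
      · simp
    simp only [List.length_cons]
    omega

lemma set_len_iff (xs : List Int) : ∀ (acc : List Int),
    ((xs.foldl PySem.Set.add acc).length = acc.length + xs.length) ↔
      (xs.Nodup ∧ ∀ x ∈ xs, x ∉ acc) := by
  induction xs with
  | nil => intro acc; simp
  | cons x xs ih =>
    intro acc
    by_cases hc : x ∈ acc
    · have hstep : (x :: xs).foldl PySem.Set.add acc = xs.foldl PySem.Set.add acc := by
        simp [PySem.Set.add, PySem.Set.contains, hc]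
      rw [hstep]
      have hle := set_len_le xs acc
      simp only [List.length_cons]
      constructor
      · intro h; omega
      · rintro ⟨_, h2⟩; exact absurd hc (h2 x (by simp))
    · have hstep : (x :: xs).foldl PySem.Set.add acc = xs.foldl PySem.Set.add (acc ++ [x]) := by
        simp [PySem.Set.add, PySem.Set.contains, hc]
      have hlen : acc.length + (x :: xs).length = (acc ++ [x]).length + xs.length := by
        simp only [List.length_append, List.length_cons, List.length_nil]
        omega
      rw [hstep, hlen, ih (acc ++ [x])]
      constructor
      · rintro ⟨h1, h2⟩
        refine ⟨List.nodup_cons.mpr ⟨fun hxxs => ?_, h1⟩, fun y hy => ?_⟩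
        · have := h2 x hxxs
          simp at this
        · rcases List.mem_cons.mp hy with rfl | hy'
          · exact hc
          · have := h2 y hy'
            simp only [List.mem_append, List.mem_singleton, not_or] at this
            exact this.1
      · rintro ⟨h1, h2⟩
        rcases List.nodup_cons.mp h1 with ⟨hxxs, hnd⟩
        refine ⟨hnd, fun y hy => ?_⟩
        simp only [List.mem_append, List.mem_singleton, not_or]
        exact ⟨h2 y (by simp [hy]), fun he => hxxs (he ▸ hy)⟩

lemma nodup_iff_len (keys : List Int) :
    (keys.length = (PySem.Set.ofList keys).length) ↔ keys.Nodup := by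
  rw [PySem.Set.ofList_eq_foldl]
  have := set_len_iff keys []
  simp only [List.length_nil, Nat.zero_add, List.not_mem_nil, not_false_iff, imp_true_iff,
    and_true] at this
  constructor
  · intro h; exact this.mp h.symm
  · intro h; exact (this.mpr h).symm

lemma b_keys (rest : List Int) : ∀ (ks : List Int) (prev : Int),
    (rest.foldl (fun (st : List Int × Int) x => if x ≠ st.2 then (st.1 ++ [x], x) else st)
      (ks, prev)).1 = ks ++ (runKeys prev rest).tail := by
  induction rest with
  | nil => intro ks prev; simp [runKeys]
  | cons x xs ih =>
    intro ks prev
    by_cases h : x = prev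
    · subst h
      rw [List.foldl_cons, if_neg (show ¬(x ≠ (ks, x).2) by simp), ih ks x]
      have hrk : runKeys x (x :: xs) = runKeys x xs := by simp [runKeys]
      rw [hrk]
    · rw [List.foldl_cons, if_pos (show x ≠ (ks, prev).2 by simpa using h), ih (ks ++ [x]) x]
      have h2 : runKeys prev (x :: xs) = prev :: runKeys x xs := by
        simp only [runKeys]; rw [if_neg h]
      obtain ⟨t, hsplit⟩ : ∃ t, runKeys x xs = x :: t := ⟨_, runKeys_cons xs x⟩
      rw [h2, hsplit]
      simp

lemma alt_iff (a0 : Int) (rest : List Int) :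
    groupNum_alt (a0 :: rest) = true ↔ (runKeys a0 rest).Nodup := by
  show decide _ = true ↔ _
  rw [decide_eq_true_iff]
  rw [b_keys rest [a0] a0]
  have hk : [a0] ++ (runKeys a0 rest).tail = runKeys a0 rest := by
    rw [runKeys_cons rest a0]; simp
  rw [hk, nodup_iff_len]

lemma a_bridge (rest : List Int) : ∀ (arr : List Int) (k : Nat) (res : List Int) (prev : Int),
    arr.drop k = rest → 1 ≤ k →
    PySem.List.pyGetD arr ((k : Int) - 1) 0 = prev →
    (PySem.List.pyRange (k : Int) (arr.length : Int) 1).foldl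
      (fun res i =>
        if res.contains (PySem.List.pyGetD arr i 0) then
          if PySem.List.pyGetD arr (i - 1) 0 = PySem.List.pyGetD arr i 0 then
            res ++ [PySem.List.pyGetD arr i 0]
          else res
        else res ++ [PySem.List.pyGetD arr i 0]) res = aLoop prev rest res := by
  induction rest with
  | nil =>
    intro arr k res prev hdrop _ _
    have hlen : arr.length ≤ k := by
      by_contra h
      have := List.drop_eq_nil_iff.mp hdrop
      omega
    rw [PySem.List.pyRange_one_eq_nil (by exact_mod_cast hlen)]
    simp [aLoop]
  | cons x xs ih =>
    intro arr k res prev hdrop hk hprev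
    have hklt : k < arr.length := by
      by_contra h
      rw [List.drop_eq_nil_iff.mpr (by omega)] at hdrop
      simp at hdrop
    have hget : arr.getD k 0 = x := by
      have h0 : arr[k]? = some x := by
        have := congrArg (fun l : List Int => l[0]?) hdrop
        simpa using this
      simp [List.getD_eq_getElem?_getD, h0]
    have hx : PySem.List.pyGetD arr (k : Int) 0 = x := by
      rw [PySem.List.pyGetD_natCast, hget]
    rw [PySem.List.pyRange_one_cons (by exact_mod_cast hklt)]
    simp only [List.foldl_cons]
    rw [show ((k : Int) - 1) = ((k - 1 : Nat) : Int) by omega] at hprev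
    have hstep :
        (if res.contains (PySem.List.pyGetD arr (k : Int) 0) then
          if PySem.List.pyGetD arr ((k : Int) - 1) 0 = PySem.List.pyGetD arr (k : Int) 0 then
            res ++ [PySem.List.pyGetD arr (k : Int) 0]
          else res
        else res ++ [PySem.List.pyGetD arr (k : Int) 0]) =
        (if res.contains x then (if prev = x then res ++ [x] else res) else res ++ [x]) := by
      rw [hx]
      rw [show ((k : Int) - 1) = ((k - 1 : Nat) : Int) by omega, hprev]
    rw [hstep]
    have hdrop' : arr.drop (k + 1) = xs := by
      have : arr.drop (k+1) = (arr.drop k).drop 1 := by rw [List.drop_drop, Nat.add_comm]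
      rw [this, hdrop]; simp
    have hprev' : PySem.List.pyGetD arr (((k+1 : Nat) : Int) - 1) 0 = x := by
      rw [show (((k+1 : Nat) : Int) - 1) = ((k : Nat) : Int) by omega]
      exact hx
    have := ih arr (k+1)
      (if res.contains x then (if prev = x then res ++ [x] else res) else res ++ [x]) x
      hdrop' (by omega) hprev'
    rw [show (((k+1 : Nat)) : Int) = (k : Int) + 1 by omega] at this
    rw [this]
    simp [aLoop]

-- ===== VERDICT (by name: the statement is the Claim_ definition above) =====
theorem groupNum_spec : Claim_equal_groupNum := by
  intro arr _ hpre
  unfold Spec_groupNum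
  match arr with
  | [] => exact absurd rfl hpre
  | [a0] =>
    have hb : groupNum_alt [a0] = true := (alt_iff a0 []).mpr (by simp [runKeys])
    have ha : groupNum [a0] = true := by simp [groupNum]
    rw [ha, hb]
  | [a0, a1] =>
    have hb : groupNum_alt [a0, a1] = true := by
      refine (alt_iff a0 [a1]).mpr ?_
      by_cases h : a1 = a0 <;> simp [runKeys, h]
      exact fun he => h he.symm
    have ha : groupNum [a0, a1] = true := by simp [groupNum]
    rw [ha, hb]
  | a0 :: a1 :: x :: rs =>
    set rest := x :: rs with hrest
    have hlen : (a0 :: a1 :: rest).length = rest.length + 2 := by simp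
    have hA : groupNum (a0 :: a1 :: rest) =
        decide ((a0 :: a1 :: rest).length = (aLoop a1 rest [a0, a1]).length) := by
      have hcond : ¬((a0 :: a1 :: rest).length = 1 ∨ (a0 :: a1 :: rest).length = 2) := by
        simp [hrest]
      rw [groupNum]
      rw [if_neg hcond]
      have hbr := a_bridge rest (a0 :: a1 :: rest) 2 [a0, a1] a1
        (by simp [hrest]) (by omega)
        (by
          rw [show ((2 : Nat) : Int) - 1 = ((1 : Nat) : Int) by omega]
          rw [PySem.List.pyGetD_natCast]
          simp)
      rw [show ((2 : Nat) : Int) = (2 : Int) by omega] at hbr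
      simp only [hbr]
    have hiff : groupNum (a0 :: a1 :: rest) = true ↔ groupNum_alt (a0 :: a1 :: rest) = true := by
      rw [hA, decide_eq_true_iff]
      have hlenres : ((a0 :: a1 :: rest).length = (aLoop a1 rest [a0, a1]).length) ↔
          ((aLoop a1 rest [a0, a1]).length = ([a0, a1] : List Int).length + rest.length) := by
        simp [hrest]; omega
      rw [hlenres, aLoop_len_iff rest a1 [a0, a1] [a0, a1] (fun v => Iff.rfl)]
      rw [final_iff rest a0 a1]
      exact (alt_iff a0 (a1 :: rest)).symm
    cases hA' : groupNum (a0 :: a1 :: rest) with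
    | true => exact (hiff.mp hA').symm
    | false =>
      cases hB' : groupNum_alt (a0 :: a1 :: rest) with
      | false => rfl
      | true => exact absurd (hiff.mpr hB') (by simp [hA'])
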